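-- pv_equiv track=rewrite | github.com/vassiliylakhonin/grantflow | grantflow/api/public_views.py | _rule_check_status_by_code
-- ===== SOURCE A (Python) =====
-- from typing import Any, Dict, Optional, cast
--
-- def _rule_check_status_by_code(rule_checks: list[Dict[str, Any]], code: str) -> str:
--     rank = {"unknown": 0, "pass": 1, "warn": 2, "fail": 3}
--     best = "unknown"
--     target = str(code or "").strip().upper()
--     for row in rule_checks:
--         if not isinstance(row, dict):
--             continue
--         row_code = str(row.get("code") or "").strip().upper()
--         if row_code != target:
--             continue
--         status = str(row.get("status") or "").strip().lower()
--         if status not in {"pass", "warn", "fail"}: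
--             continue
--         if rank[status] > rank[best]:
--             best = status
--     return best
-- ===== SOURCE B (Python) =====
-- def _rule_check_status_by_code(rule_checks, code):
--     target = str(code or "").strip().upper()
--     seen = set()
--     for row in rule_checks:
--         if not isinstance(row, dict):
--             continue
--         if str(row.get("code") or "").strip().upper() != target:
--             continue
--         status = str(row.get("status") or "").strip().lower()
--         if status in ("pass", "warn", "fail"):
--             seen.add(status)
--     for s in ("fail", "warn", "pass"):
--         if s in seen:
--             return s
--     return "unknown"
-- ===== Notes on version B (the rewrite author's own statement) =====
-- stated objective: simpler
-- what changed: Replaces the inline rank-dict max-tracking accumulator with one pass collecting the set of valid matching statuses followed by a lookup over the fixed priority order ('fail','warn','pass').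
import Mathlib
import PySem

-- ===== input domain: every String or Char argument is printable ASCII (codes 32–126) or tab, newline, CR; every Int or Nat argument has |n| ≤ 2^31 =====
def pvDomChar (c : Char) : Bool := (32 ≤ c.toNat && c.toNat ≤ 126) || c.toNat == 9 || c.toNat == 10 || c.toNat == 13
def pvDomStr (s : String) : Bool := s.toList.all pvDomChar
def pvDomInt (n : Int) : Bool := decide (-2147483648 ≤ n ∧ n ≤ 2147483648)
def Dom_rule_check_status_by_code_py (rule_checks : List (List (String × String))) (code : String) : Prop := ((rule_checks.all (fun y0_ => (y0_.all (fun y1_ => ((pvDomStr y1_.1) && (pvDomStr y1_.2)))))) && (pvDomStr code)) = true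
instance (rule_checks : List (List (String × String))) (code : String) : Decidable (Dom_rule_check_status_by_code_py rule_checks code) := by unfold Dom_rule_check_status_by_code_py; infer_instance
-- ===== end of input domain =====

-- B replaces A's rank-dict max-tracking accumulator by collecting the set of valid matching
-- statuses and then scanning the fixed priority order ('fail','warn','pass'): simpler decomposition.

-- ===== PORT A =====
-- rank = {"unknown": 0, "pass": 1, "warn": 2, "fail": 3}; rank[s] is always hit with s a key,
-- so the lookup is ported as getD 0 on the literal dict (exact on all keys that occur).
def pvRank : List (String × Int) :=
  [("unknown", 0), ("pass", 1), ("warn", 2), ("fail", 3)]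

def rule_check_status_by_code_py (rule_checks : List (List (String × String))) (code : String) : String :=
  -- target = str(code or "").strip().upper()  (code is a str: `code or ""` = code)
  let target := PySem.Str.upper (PySem.Str.strip code)
  rule_checks.foldl (fun best row =>
    -- every row is a dict under the type convention, so `isinstance(row, dict)` always holds
    let row_code := PySem.Str.upper (PySem.Str.strip ((row.lookup "code").getD ""))
    if row_code ≠ target then best
    else
      let status := PySem.Str.lower (PySem.Str.strip ((row.lookup "status").getD ""))
      if ¬ (status = "pass" ∨ status = "warn" ∨ status = "fail") then best
      else if ((pvRank.lookup status).getD 0) > ((pvRank.lookup best).getD 0) then status else best)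
    "unknown"

-- ===== PORT B =====
def rule_check_status_by_code_py_alt (rule_checks : List (List (String × String))) (code : String) : String :=
  let target := PySem.Str.upper (PySem.Str.strip code)
  let seen : PySem.Set String := rule_checks.foldl (fun s row =>
    if PySem.Str.upper (PySem.Str.strip ((row.lookup "code").getD "")) ≠ target then s
    else
      let status := PySem.Str.lower (PySem.Str.strip ((row.lookup "status").getD ""))
      if status = "pass" ∨ status = "warn" ∨ status = "fail" then PySem.Set.add s status else s)
    PySem.Set.empty
  -- for s in ("fail", "warn", "pass"): if s in seen: return s
  if PySem.Set.contains seen "fail" then "fail"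
  else if PySem.Set.contains seen "warn" then "warn"
  else if PySem.Set.contains seen "pass" then "pass"
  else "unknown"

-- ===== PRECONDITION & SPEC =====
def Spec_rule_check_status_by_code_py (rule_checks : List (List (String × String))) (code : String) (out : String) : Prop := out = rule_check_status_by_code_py_alt rule_checks code
instance (rule_checks : List (List (String × String))) (code : String) (out : String) : Decidable (Spec_rule_check_status_by_code_py rule_checks code out) := by unfold Spec_rule_check_status_by_code_py; infer_instance

-- ===== CLAIM (what is proved, stated in full; the proofs are below) =====
def Claim_equal_rule_check_status_by_code_py : Prop := ∀ (rule_checks : List (List (String × String))) (code : String), Dom_rule_check_status_by_code_py rule_checks code → Spec_rule_check_status_by_code_py rule_checks code (rule_check_status_by_code_py rule_checks code)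

-- ===== LEMMAS AND PROOFS =====

-- pick: the result B reads off a seen-set
def pvPick (s : PySem.Set String) : String :=
  if PySem.Set.contains s "fail" then "fail"
  else if PySem.Set.contains s "warn" then "warn"
  else if PySem.Set.contains s "pass" then "pass"
  else "unknown"

-- one row preserves the invariant: A's accumulator equals pvPick of B's accumulator
theorem pv_step (s : PySem.Set String) (row : List (String × String)) (target : String) :
    (let row_code := PySem.Str.upper (PySem.Str.strip ((row.lookup "code").getD ""))
     if row_code ≠ target then pvPick s
     else
       let status := PySem.Str.lower (PySem.Str.strip ((row.lookup "status").getD ""))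
       if ¬ (status = "pass" ∨ status = "warn" ∨ status = "fail") then pvPick s
       else if ((pvRank.lookup status).getD 0) > ((pvRank.lookup (pvPick s)).getD 0) then status else pvPick s)
    = pvPick (if PySem.Str.upper (PySem.Str.strip ((row.lookup "code").getD "")) ≠ target then s
       else
         let status := PySem.Str.lower (PySem.Str.strip ((row.lookup "status").getD ""))
         if status = "pass" ∨ status = "warn" ∨ status = "fail" then PySem.Set.add s status else s) := by
  by_cases hc : PySem.Str.upper (PySem.Str.strip ((row.lookup "code").getD "")) ≠ target
  · simp only [if_pos hc]
  · simp only [if_neg hc]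
    generalize PySem.Str.lower (PySem.Str.strip ((row.lookup "status").getD "")) = st
    by_cases hv : st = "pass" ∨ st = "warn" ∨ st = "fail"
    · simp only [if_pos hv, if_neg (not_not_intro hv)]
      rcases hv with h | h | h <;> subst h <;>
        by_cases hf : "fail" ∈ s <;>
        by_cases hw : "warn" ∈ s <;>
        by_cases hp : "pass" ∈ s <;>
        simp [pvPick, pvRank, PySem.Set.contains, List.contains_eq_mem,
              List.lookup, hf, hw, hp]
    · simp only [if_neg hv, if_pos hv]

theorem pv_fold (rows : List (List (String × String))) (target : String) (s : PySem.Set String) :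
    rows.foldl (fun best row =>
      let row_code := PySem.Str.upper (PySem.Str.strip ((row.lookup "code").getD ""))
      if row_code ≠ target then best
      else
        let status := PySem.Str.lower (PySem.Str.strip ((row.lookup "status").getD ""))
        if ¬ (status = "pass" ∨ status = "warn" ∨ status = "fail") then best
        else if ((pvRank.lookup status).getD 0) > ((pvRank.lookup best).getD 0) then status else best)
      (pvPick s)
    = pvPick (rows.foldl (fun s row =>
        if PySem.Str.upper (PySem.Str.strip ((row.lookup "code").getD "")) ≠ target then s
        else
          let status := PySem.Str.lower (PySem.Str.strip ((row.lookup "status").getD ""))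
          if status = "pass" ∨ status = "warn" ∨ status = "fail" then PySem.Set.add s status else s) s) := by
  induction rows generalizing s with
  | nil => rfl
  | cons r rs ih =>
    simp only [List.foldl_cons]
    rw [pv_step s r target]
    exact ih _

-- ===== VERDICT (by name: the statement is the Claim_ definition above) =====
theorem rule_check_status_by_code_py_spec : Claim_equal_rule_check_status_by_code_py := by
  intro rule_checks code _
  show rule_check_status_by_code_py rule_checks code = rule_check_status_by_code_py_alt rule_checks code
  unfold rule_check_status_by_code_py rule_check_status_by_code_py_alt
  have h0 : "unknown" = pvPick PySem.Set.empty := rfl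
  rw [h0, pv_fold]
  rfl
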